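-- pv_equiv track=rewrite | github.com/liliwwww/LargeFileConverter | convert_report.py | parse_line5
-- ===== SOURCE A (Python) =====
-- def parse_line5(line: str) -> list[str]:
--     """
--     解析第5行：借记卡封顶/费率 + 贷记卡费率，共6个字段。
--
--     字段顺序：
--       借记卡D1封顶金额分(整数,可空)  借记卡D1费率(小数)
--       借记卡D0封顶金额分(整数,可空)  借记卡D0费率(小数)
--       贷记卡D1(小数)  贷记卡D0(小数)
--
--     关键：封顶金额分是整数(如2000,2500)，费率是小数(如.005,.0038)，
--     利用值类型区分，不依赖列位置，可正确处理封顶为空的情况。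
--     """
--     tokens = line.split()  # 按任意空白分割
--
--     fields = ['', '', '', '', '', '']
--     # fields[0]=借记卡D1封顶  [1]=借记卡D1费率  [2]=借记卡D0封顶
--     # fields[3]=借记卡D0费率  [4]=贷记卡D1      [5]=贷记卡D0
--
--     def is_cap(t: str) -> bool:
--         """封顶金额分：纯整数（不含小数点）"""
--         return t.isdigit()
--
--     def is_rate(t: str) -> bool:
--         """费率：包含小数点"""
--         return '.' in t
--
--     slot = 0  # 当前期望填入的槽位
--     for token in tokens:
--         if slot == 0:
--             # 期望: 封顶D1(可选) 或 费率D1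
--             if is_cap(token):
--                 fields[0] = token   # 封顶D1 有值
--                 slot = 1
--             elif is_rate(token):
--                 fields[0] = ''      # 封顶D1 为空，直接到费率D1
--                 fields[1] = token
--                 slot = 2
--         elif slot == 1:
--             # 期望: 费率D1
--             fields[1] = token
--             slot = 2
--         elif slot == 2:
--             # 期望: 封顶D0(可选) 或 费率D0
--             if is_cap(token):
--                 fields[2] = token   # 封顶D0 有值
--                 slot = 3
--             elif is_rate(token):
--                 fields[2] = ''      # 封顶D0 为空
--                 fields[3] = token
--                 slot = 4
--         elif slot == 3:
--             # 期望: 费率D0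
--             fields[3] = token
--             slot = 4
--         elif slot == 4:
--             # 期望: 贷记卡D1
--             fields[4] = token
--             slot = 5
--         elif slot == 5:
--             # 期望: 贷记卡D0
--             fields[5] = token
--             break
--
--     return fields
-- ===== SOURCE B (Python) =====
-- def parse_line5(line: str) -> list[str]:
--     # Index-based staged parser: skip to each debit group's cap/rate, then take
--     # the two credit tokens unconditionally; missing tokens stay ''.
--     tokens = line.split()
--     n = len(tokens)
--     fields = ['', '', '', '', '', '']
--     i = 0
--     for g in (0, 2):
--         while i < n and not (tokens[i].isdigit() or '.' in tokens[i]):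
--             i += 1
--         if i < n:
--             if tokens[i].isdigit():
--                 fields[g] = tokens[i]
--                 i += 1
--                 if i < n:
--                     fields[g + 1] = tokens[i]
--                     i += 1
--             else:
--                 fields[g + 1] = tokens[i]
--                 i += 1
--     if i < n:
--         fields[4] = tokens[i]
--         i += 1
--     if i < n:
--         fields[5] = tokens[i]
--     return fields
-- ===== Notes on version B (the rewrite author's own statement) =====
-- stated objective: simpler
-- what changed: Replaces A's slot state machine driven by a per-token for-loop with an index/stage parser: for each debit group skip non-cap/non-rate tokens, read cap then rate (or rate alone), then take the two credit tokens unconditionally.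
import Mathlib
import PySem

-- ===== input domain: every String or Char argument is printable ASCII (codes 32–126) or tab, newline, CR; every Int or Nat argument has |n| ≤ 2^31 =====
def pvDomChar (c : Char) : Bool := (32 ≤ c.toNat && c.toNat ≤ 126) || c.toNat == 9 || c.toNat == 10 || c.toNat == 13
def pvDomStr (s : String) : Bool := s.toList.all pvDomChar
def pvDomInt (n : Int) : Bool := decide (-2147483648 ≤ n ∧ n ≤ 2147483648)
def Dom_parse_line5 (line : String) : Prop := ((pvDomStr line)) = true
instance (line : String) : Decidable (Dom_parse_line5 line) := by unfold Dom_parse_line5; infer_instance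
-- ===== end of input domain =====

-- B replaces A's slot state machine by an index-style staged parser (skip to each
-- debit group, then take the two credit tokens); objective: simpler.

-- ===== PORT A =====
-- is_cap / is_rate helpers (shared by both ports, as both Pythons use the same tests)
def pvCap (t : String) : Bool := PySem.Str.strIsdigit t
def pvRate (t : String) : Bool := PySem.Str.isIn "." t

-- the for-loop over tokens with the slot state; slot 5 assigns and breaks
def pvLoopA : List String → Nat → List String → List String
  | [], _, f => f
  | t :: rest, slot, f =>
    if slot = 0 then
      if pvCap t then pvLoopA rest 1 (f.set 0 t)
      else if pvRate t then pvLoopA rest 2 ((f.set 0 "").set 1 t)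
      else pvLoopA rest 0 f
    else if slot = 1 then pvLoopA rest 2 (f.set 1 t)
    else if slot = 2 then
      if pvCap t then pvLoopA rest 3 (f.set 2 t)
      else if pvRate t then pvLoopA rest 4 ((f.set 2 "").set 3 t)
      else pvLoopA rest 2 f
    else if slot = 3 then pvLoopA rest 4 (f.set 3 t)
    else if slot = 4 then pvLoopA rest 5 (f.set 4 t)
    else if slot = 5 then f.set 5 t      -- break after the assignment
    else pvLoopA rest slot f             -- unreachable: no branch fires, loop continues

def parse_line5 (line : String) : List String :=
  pvLoopA (PySem.Str.split₀ line) 0 ["", "", "", "", "", ""]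

-- ===== PORT B =====
-- the inner while loop: advance past tokens that are neither cap-like nor rate-like
def pvSkip : List String → List String
  | [] => []
  | t :: rest => if !(pvCap t || pvRate t) then pvSkip rest else t :: rest

-- parse one debit group: returns (cap field, rate field, remaining tokens)
def pvGroup (ts : List String) : String × String × List String :=
  match pvSkip ts with
  | [] => ("", "", [])
  | t :: rest =>
    if pvCap t then
      match rest with
      | [] => (t, "", [])
      | r :: rest' => (t, r, rest')
    else ("", t, rest)

def parse_line5_alt (line : String) : List String :=
  let g1 := pvGroup (PySem.Str.split₀ line)
  let g2 := pvGroup g1.2.2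
  match g2.2.2 with
  | [] => [g1.1, g1.2.1, g2.1, g2.2.1, "", ""]
  | d1 :: rest =>
    match rest with
    | [] => [g1.1, g1.2.1, g2.1, g2.2.1, d1, ""]
    | d0 :: _ => [g1.1, g1.2.1, g2.1, g2.2.1, d1, d0]

-- ===== PRECONDITION & SPEC =====
def Spec_parse_line5 (line : String) (out : List String) : Prop := out = parse_line5_alt line
instance (line : String) (out : List String) : Decidable (Spec_parse_line5 line out) := by unfold Spec_parse_line5; infer_instance

-- ===== CLAIM (what is proved, stated in full; the proofs are below) =====
def Claim_equal_parse_line5 : Prop := ∀ (line : String), Dom_parse_line5 line → Spec_parse_line5 line (parse_line5 line)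

-- ===== LEMMAS AND PROOFS =====
-- B's result once both groups are parsed, as one function of the leftover tokens
def pvTail (ts : List String) (a b c d : String) : List String :=
  match ts with
  | [] => [a, b, c, d, "", ""]
  | [t] => [a, b, c, d, t, ""]
  | t :: u :: _ => [a, b, c, d, t, u]

-- pvGroup step facts
theorem pvGroup_skip {t : String} (rest : List String) (hc : pvCap t = false)
    (hr : pvRate t = false) : pvGroup (t :: rest) = pvGroup rest := by
  simp [pvGroup, pvSkip, hc, hr]

theorem pvGroup_cap {t : String} (rest : List String) (hc : pvCap t = true) :
    pvGroup (t :: rest) = match rest with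
      | [] => (t, "", [])
      | r :: rest' => (t, r, rest') := by
  simp [pvGroup, pvSkip, hc]

theorem pvGroup_rate {t : String} (rest : List String) (hc : pvCap t = false)
    (hr : pvRate t = true) : pvGroup (t :: rest) = ("", t, rest) := by
  simp [pvGroup, pvSkip, hc, hr]

-- pvLoopA step facts (one per branch of A's state machine)
theorem loop0_skip {t : String} (rest f) (hc : pvCap t = false) (hr : pvRate t = false) :
    pvLoopA (t :: rest) 0 f = pvLoopA rest 0 f := by simp [pvLoopA, hc, hr]

theorem loop0_cap {t : String} (rest f) (hc : pvCap t = true) :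
    pvLoopA (t :: rest) 0 f = pvLoopA rest 1 (f.set 0 t) := by simp [pvLoopA, hc]

theorem loop0_rate {t : String} (rest f) (hc : pvCap t = false) (hr : pvRate t = true) :
    pvLoopA (t :: rest) 0 f = pvLoopA rest 2 ((f.set 0 "").set 1 t) := by
  simp [pvLoopA, hc, hr]

theorem loop1 (t : String) (rest f) : pvLoopA (t :: rest) 1 f = pvLoopA rest 2 (f.set 1 t) := by
  simp [pvLoopA]

theorem loop2_skip {t : String} (rest f) (hc : pvCap t = false) (hr : pvRate t = false) :
    pvLoopA (t :: rest) 2 f = pvLoopA rest 2 f := by simp [pvLoopA, hc, hr]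

theorem loop2_cap {t : String} (rest f) (hc : pvCap t = true) :
    pvLoopA (t :: rest) 2 f = pvLoopA rest 3 (f.set 2 t) := by simp [pvLoopA, hc]

theorem loop2_rate {t : String} (rest f) (hc : pvCap t = false) (hr : pvRate t = true) :
    pvLoopA (t :: rest) 2 f = pvLoopA rest 4 ((f.set 2 "").set 3 t) := by
  simp [pvLoopA, hc, hr]

theorem loop3 (t : String) (rest f) : pvLoopA (t :: rest) 3 f = pvLoopA rest 4 (f.set 3 t) := by
  simp [pvLoopA]

theorem pvLoopA_four (ts : List String) (a b c d : String) :
    pvLoopA ts 4 [a, b, c, d, "", ""] = pvTail ts a b c d := by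
  match ts with
  | [] => rfl
  | [t] => simp [pvLoopA, pvTail]
  | t :: u :: r => simp [pvLoopA, pvTail]

-- B from the second group on, as one function of the tokens left after group 1
def pvRun2 (ts : List String) (a b : String) : List String :=
  pvTail (pvGroup ts).2.2 a b (pvGroup ts).1 (pvGroup ts).2.1

theorem pvLoopA_two (ts : List String) (a b : String) :
    pvLoopA ts 2 [a, b, "", "", "", ""] = pvRun2 ts a b := by
  induction ts with
  | nil => rfl
  | cons t rest ih =>
    by_cases hc : pvCap t = true
    · rw [loop2_cap rest _ hc]
      unfold pvRun2
      rw [pvGroup_cap rest hc]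
      match rest with
      | [] => simp [pvLoopA, pvTail, List.set]
      | r :: rest' =>
        rw [List.set, loop3]
        simpa [pvRun2, List.set] using pvLoopA_four rest' a b t r
    · rw [Bool.not_eq_true] at hc
      by_cases hr : pvRate t = true
      · rw [loop2_rate rest _ hc hr]
        unfold pvRun2
        rw [pvGroup_rate rest hc hr]
        simpa [List.set] using pvLoopA_four rest a b "" t
      · rw [Bool.not_eq_true] at hr
        rw [loop2_skip rest _ hc hr]
        unfold pvRun2
        rw [pvGroup_skip rest hc hr]
        exact ih

theorem pvLoopA_zero (ts : List String) :
    pvLoopA ts 0 ["", "", "", "", "", ""] =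
      pvRun2 (pvGroup ts).2.2 (pvGroup ts).1 (pvGroup ts).2.1 := by
  induction ts with
  | nil => rfl
  | cons t rest ih =>
    by_cases hc : pvCap t = true
    · rw [loop0_cap rest _ hc, pvGroup_cap rest hc]
      match rest with
      | [] => simp [pvLoopA, pvRun2, pvGroup, pvSkip, pvTail, List.set]
      | r :: rest' =>
        rw [List.set, loop1]
        simpa [List.set] using pvLoopA_two rest' t r
    · rw [Bool.not_eq_true] at hc
      by_cases hr : pvRate t = true
      · rw [loop0_rate rest _ hc hr, pvGroup_rate rest hc hr]
        simpa [List.set] using pvLoopA_two rest "" t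
      · rw [Bool.not_eq_true] at hr
        rw [loop0_skip rest _ hc hr, pvGroup_skip rest hc hr]
        exact ih

-- B's body, for generic tokens, equals the pvRun2/pvTail form
theorem pvAlt_eq (ts : List String) :
    (let g1 := pvGroup ts
     let g2 := pvGroup g1.2.2
     match g2.2.2 with
     | [] => [g1.1, g1.2.1, g2.1, g2.2.1, "", ""]
     | d1 :: rest =>
       match rest with
       | [] => [g1.1, g1.2.1, g2.1, g2.2.1, d1, ""]
       | d0 :: _ => [g1.1, g1.2.1, g2.1, g2.2.1, d1, d0]) =
    pvRun2 (pvGroup ts).2.2 (pvGroup ts).1 (pvGroup ts).2.1 := by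
  unfold pvRun2
  cases h : (pvGroup (pvGroup ts).2.2).2.2 with
  | nil => simp [pvTail, h]
  | cons d1 rest => cases rest <;> simp [pvTail, h]

-- ===== VERDICT (by name: the statement is the Claim_ definition above) =====
theorem parse_line5_spec : Claim_equal_parse_line5 := by
  intro line _
  show parse_line5 line = parse_line5_alt line
  unfold parse_line5 parse_line5_alt
  rw [pvLoopA_zero, pvAlt_eq]
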